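-- pv_equiv track=rewrite | github.com/whyj107/CodeWar | 20220428_Find the total white and black areas in a strange chessboard.py | white_black_areas
-- ===== SOURCE A (Python) =====
-- def white_black_areas(cs, rs):
--     white, black = 0, 0
--     tmp1, tmp2 = 0, 0
--     for idx, r in enumerate(rs):
--         if idx%2 == 0:
--             tmp1 += r
--         else:
--             tmp2 += r
--     for idx, c in enumerate(cs):
--         w = (idx%2 == 0)
--
--         if w:
--             white += (tmp1*c)
--             black += (tmp2*c)
--         else:
--             white += (tmp2*c)
--             black += (tmp1*c)
--     return (white, black)
-- ===== SOURCE B (Python) =====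
-- def white_black_areas(cs, rs):
--     sr, ar, sign = 0, 0, 1
--     for r in rs:
--         sr += r
--         ar += sign * r
--         sign = -sign
--     sc, ac, sign = 0, 0, 1
--     for c in cs:
--         sc += c
--         ac += sign * c
--         sign = -sign
--     t = sr * sc
--     d = ar * ac
--     return ((t + d) // 2, (t - d) // 2)
-- ===== Notes on version B (the rewrite author's own statement) =====
-- stated objective: alternative
-- what changed: B never buckets indices by parity: it accumulates each list's total sum and sign-alternating sum in one pass, then recovers white and black via the closed identities white=(Sr*Sc+Ar*Ac)//2, black=(Sr*Sc-Ar*Ac)//2 (always an exact halving).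
import Mathlib
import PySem

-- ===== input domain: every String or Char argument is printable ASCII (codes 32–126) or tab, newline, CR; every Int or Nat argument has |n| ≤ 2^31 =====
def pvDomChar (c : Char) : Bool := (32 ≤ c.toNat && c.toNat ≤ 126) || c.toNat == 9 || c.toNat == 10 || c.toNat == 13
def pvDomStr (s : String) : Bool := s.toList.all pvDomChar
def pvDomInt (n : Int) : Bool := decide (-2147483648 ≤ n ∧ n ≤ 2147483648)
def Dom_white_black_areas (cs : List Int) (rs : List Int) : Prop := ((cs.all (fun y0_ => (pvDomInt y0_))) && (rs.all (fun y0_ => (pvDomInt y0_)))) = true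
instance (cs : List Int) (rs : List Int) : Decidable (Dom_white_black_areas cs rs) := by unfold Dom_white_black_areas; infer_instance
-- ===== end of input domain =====

-- B computes each list's total sum and sign-alternating sum in one pass and recovers
-- (white, black) by the exact closed identities ((t+d)//2, (t-d)//2) (objective: alternative).

-- ===== PORT A =====
-- first loop body: tmp1 += r at even idx, tmp2 += r at odd idx
def aRowStep (t : Int × Int) (p : Int × Int) : Int × Int :=
  if p.1 % 2 == 0 then (t.1 + p.2, t.2) else (t.1, t.2 + p.2)

-- second loop body: accumulate (white, black) per column
def aColStep (tmp1 tmp2 : Int) (wb : Int × Int) (p : Int × Int) : Int × Int :=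
  let w := p.1 % 2 == 0
  if w then (wb.1 + tmp1 * p.2, wb.2 + tmp2 * p.2)
  else (wb.1 + tmp2 * p.2, wb.2 + tmp1 * p.2)

def white_black_areas (cs : List Int) (rs : List Int) : Int × Int :=
  let t := (PySem.List.enumerate rs 0).foldl aRowStep (0, 0)
  (PySem.List.enumerate cs 0).foldl (aColStep t.1 t.2) (0, 0)

-- ===== PORT B =====
-- B's loop body: state (sum, alternating sum, sign)
def bStep (st : Int × Int × Int) (x : Int) : Int × Int × Int :=
  (st.1 + x, st.2.1 + st.2.2 * x, -st.2.2)

def white_black_areas_alt (cs : List Int) (rs : List Int) : Int × Int :=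
  let r := rs.foldl bStep (0, 0, 1)
  let c := cs.foldl bStep (0, 0, 1)
  let t := r.1 * c.1
  let d := r.2.1 * c.2.1
  (PySem.Int.floordiv (t + d) 2, PySem.Int.floordiv (t - d) 2)

-- ===== PRECONDITION & SPEC =====
def Spec_white_black_areas (cs : List Int) (rs : List Int) (out : Int × Int) : Prop := out = white_black_areas_alt cs rs
instance (cs : List Int) (rs : List Int) (out : Int × Int) : Decidable (Spec_white_black_areas cs rs out) := by unfold Spec_white_black_areas; infer_instance

-- ===== CLAIM (what is proved, stated in full; the proofs are below) =====
def Claim_equal_white_black_areas : Prop := ∀ (cs : List Int) (rs : List Int), Dom_white_black_areas cs rs → Spec_white_black_areas cs rs (white_black_areas cs rs)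

-- ===== LEMMAS AND PROOFS =====
-- proof-only helper: (sum at even indices, sum at odd indices)
def ps : List Int → Int × Int
  | [] => (0, 0)
  | [x] => (x, 0)
  | x :: y :: t => let p := ps t; (x + p.1, y + p.2)

theorem rowLoop_eq (rs : List Int) : ∀ (m : Nat) (a b : Int),
    (PySem.List.enumerate rs (2 * (m : Int))).foldl aRowStep (a, b)
      = (a + (ps rs).1, b + (ps rs).2) := by
  induction rs using ps.induct with
  | case1 => intro m a b; simp [PySem.List.enumerate_nil, ps]
  | case2 x =>
      intro m a b
      simp only [PySem.List.enumerate_cons, PySem.List.enumerate_nil, List.foldl, ps, aRowStep]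
      have h : ((2 * (m : Int)) % 2 == 0) = true := by simp [Int.mul_emod_right]
      simp
  | case3 x y t ih =>
      intro m a b
      simp only [PySem.List.enumerate_cons, List.foldl, aRowStep]
      have h1 : ((2 * (m : Int)) % 2 == 0) = true := by simp [Int.mul_emod_right]
      have h2 : ((2 * (m : Int) + 1) % 2 == 0) = false := by
        simp only [beq_eq_false_iff_ne]; omega
      have h3 : (2 * (m : Int) + 1 + 1) = 2 * ((m + 1 : Nat) : Int) := by push_cast; ring
      simp only [h1, h2, if_true]
      rw [h3, ih (m + 1)]
      simp [ps]
      constructor <;> ring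

theorem colLoop_eq (t1 t2 : Int) (cs : List Int) : ∀ (m : Nat) (a b : Int),
    (PySem.List.enumerate cs (2 * (m : Int))).foldl (aColStep t1 t2) (a, b)
      = (a + t1 * (ps cs).1 + t2 * (ps cs).2,
         b + t2 * (ps cs).1 + t1 * (ps cs).2) := by
  induction cs using ps.induct with
  | case1 => intro m a b; simp [PySem.List.enumerate_nil, ps]
  | case2 x =>
      intro m a b
      simp only [PySem.List.enumerate_cons, PySem.List.enumerate_nil, List.foldl, ps, aColStep]
      have h : ((2 * (m : Int)) % 2 == 0) = true := by simp [Int.mul_emod_right]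
      simp
  | case3 x y t ih =>
      intro m a b
      simp only [PySem.List.enumerate_cons, List.foldl, aColStep]
      have h1 : ((2 * (m : Int)) % 2 == 0) = true := by simp [Int.mul_emod_right]
      have h2 : ((2 * (m : Int) + 1) % 2 == 0) = false := by
        simp only [beq_eq_false_iff_ne]; omega
      have h3 : (2 * (m : Int) + 1 + 1) = 2 * ((m + 1 : Nat) : Int) := by push_cast; ring
      simp only [h1, h2, if_true]
      rw [h3, ih (m + 1)]
      simp [ps]
      constructor <;> ring

-- B's loop in terms of the parity sums: sum = e+o, alternating sum scaled by the sign
theorem bLoop_eq (xs : List Int) : ∀ (s a sg : Int),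
    (xs.foldl bStep (s, a, sg)).1 = s + (ps xs).1 + (ps xs).2 ∧
    (xs.foldl bStep (s, a, sg)).2.1 = a + sg * ((ps xs).1 - (ps xs).2) := by
  induction xs using ps.induct with
  | case1 => intro s a sg; simp [ps]
  | case2 x => intro s a sg; simp [ps, List.foldl, bStep]
  | case3 x y t ih =>
      intro s a sg
      simp only [List.foldl, bStep]
      rw [show (- -sg : Int) = sg by ring]
      obtain ⟨h1, h2⟩ := ih (s + x + y) (a + sg * x + -sg * y) sg
      refine ⟨?_, ?_⟩
      · rw [h1]; simp [ps]; ring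
      · rw [h2]; simp [ps]; ring

theorem fdiv_two_mul (k : Int) : PySem.Int.floordiv (2 * k) 2 = k := by
  rw [PySem.Int.floordiv_eq_ediv_of_pos (by norm_num)]
  omega

-- ===== VERDICT (by name: the statement is the Claim_ definition above) =====
theorem white_black_areas_spec : Claim_equal_white_black_areas := by
  intro cs rs _
  unfold Spec_white_black_areas white_black_areas white_black_areas_alt
  have hr := rowLoop_eq rs 0 0 0
  have hc := colLoop_eq ((ps rs).1) ((ps rs).2) cs 0 0 0
  simp only [Nat.cast_zero, mul_zero, zero_add] at hr hc
  have hbr := bLoop_eq rs 0 0 1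
  have hbc := bLoop_eq cs 0 0 1
  simp only [hr, hc]
  rw [hbr.1, hbr.2, hbc.1, hbc.2]
  have e1 : ((0:Int) + (ps rs).1 + (ps rs).2) * (0 + (ps cs).1 + (ps cs).2)
      + (0 + 1 * ((ps rs).1 - (ps rs).2)) * (0 + 1 * ((ps cs).1 - (ps cs).2))
      = 2 * ((ps rs).1 * (ps cs).1 + (ps rs).2 * (ps cs).2) := by ring
  have e2 : ((0:Int) + (ps rs).1 + (ps rs).2) * (0 + (ps cs).1 + (ps cs).2)
      - (0 + 1 * ((ps rs).1 - (ps rs).2)) * (0 + 1 * ((ps cs).1 - (ps cs).2))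
      = 2 * ((ps rs).2 * (ps cs).1 + (ps rs).1 * (ps cs).2) := by ring
  rw [e1, e2, fdiv_two_mul, fdiv_two_mul]
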